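-- pv_equiv track=rewrite | github.com/greyels/interview | dsa/array/find_similar_patterns.py | find_similar_patterns
-- ===== SOURCE A (Python) =====
-- from typing import List
--
-- def find_similar_patterns(words: List[str], pattern: str) -> List[str]:
--     def has_pattern(word):
--         if len(word) != len(pattern):
--             return False
--         for i in range(len(word) - 1):
--             slow, fast = i, i + 1
--             if (word[slow] != word[fast] and pattern[slow] == pattern[fast]) \
--                     or (word[slow] == word[fast] and pattern[slow] != pattern[fast]):
--                 return False
--         return True
--
--     return [word for word in words if has_pattern(word)]
-- ===== SOURCE B (Python) =====
-- from typing import List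
--
-- def find_similar_patterns(words: List[str], pattern: str) -> List[str]:
--     def runs(s):
--         # run-length encoding of s: lengths of maximal blocks of equal chars
--         out = []
--         i, n = 0, len(s)
--         while i < n:
--             j = i + 1
--             while j < n and s[j] == s[i]:
--                 j += 1
--             out.append(j - i)
--             i = j
--         return out
--     pr = runs(pattern)
--     return [w for w in words if runs(w) == pr]
-- ===== Notes on version B (the rewrite author's own statement) =====
-- stated objective: alternative
-- what changed: B run-length-encodes the pattern once and each word, and keeps a word iff its list of run lengths equals the pattern's; the RLE determines both the length and every adjacent-equality relation, so A's explicit length guard and per-index pair-comparison loop disappear.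
import Mathlib
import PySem

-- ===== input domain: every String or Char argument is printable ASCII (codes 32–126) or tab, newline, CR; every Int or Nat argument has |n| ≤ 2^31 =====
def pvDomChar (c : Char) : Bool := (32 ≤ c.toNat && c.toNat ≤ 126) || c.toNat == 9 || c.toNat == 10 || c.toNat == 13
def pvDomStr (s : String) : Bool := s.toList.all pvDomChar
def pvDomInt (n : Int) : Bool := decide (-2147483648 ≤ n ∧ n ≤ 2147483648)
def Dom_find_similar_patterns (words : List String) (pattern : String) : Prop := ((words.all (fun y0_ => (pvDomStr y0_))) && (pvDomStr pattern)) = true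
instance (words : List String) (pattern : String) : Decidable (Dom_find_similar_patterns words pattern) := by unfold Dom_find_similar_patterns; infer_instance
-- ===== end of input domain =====

-- B compares run-length encodings instead of A's per-index adjacent-pair comparisons with a length guard; alternative algorithm, same cost.


-- ===== PORT A =====
-- A's inner loop over i in range(len(word)-1); all indexing is in range there, so getD is exact.
def hasPatternLoop (w p : List Char) : List Nat → Bool
  | [] => true
  | i :: rest =>
    if ((w.getD i ' ' ≠ w.getD (i+1) ' ' ∧ p.getD i ' ' = p.getD (i+1) ' ')
        ∨ (w.getD i ' ' = w.getD (i+1) ' ' ∧ p.getD i ' ' ≠ p.getD (i+1) ' '))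
    then false
    else hasPatternLoop w p rest

def find_similar_patterns (words : List String) (pattern : String) : List String :=
  words.filter (fun word =>
    let w := word.toList
    let p := pattern.toList
    if w.length ≠ p.length then false
    else hasPatternLoop w p (List.range (w.length - 1)))

-- ===== PORT B =====
-- Source B's runs(s): each step of the outer while loop consumes one maximal run
-- (the inner 'while s[j] == s[i]' scan is the takeWhile) and records its length.
def pvRuns (s : List Char) : List Nat :=
  match s with
  | [] => []
  | c :: t =>
    let k := (t.takeWhile (· == c)).length
    (k + 1) :: pvRuns (t.drop k)
termination_by s.length
decreasing_by
  simp only [List.length_drop, List.length_cons]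
  omega

def find_similar_patterns_alt (words : List String) (pattern : String) : List String :=
  let pr := pvRuns pattern.toList
  words.filter (fun w => pvRuns w.toList == pr)

-- ===== PRECONDITION & SPEC =====
def Spec_find_similar_patterns (words : List String) (pattern : String) (out : List String) : Prop := out = find_similar_patterns_alt words pattern
instance (words : List String) (pattern : String) (out : List String) : Decidable (Spec_find_similar_patterns words pattern out) := by unfold Spec_find_similar_patterns; infer_instance

-- ===== CLAIM (what is proved, stated in full; the proofs are below) =====
def Claim_equal_find_similar_patterns : Prop := ∀ (words : List String) (pattern : String), Dom_find_similar_patterns words pattern → Spec_find_similar_patterns words pattern (find_similar_patterns words pattern)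

-- ===== LEMMAS AND PROOFS =====

-- proof-side helper: the adjacent-equality signature
def pvSig (s : List Char) : List Bool := List.zipWith (fun a b => a == b) s s.tail

-- A's early-exit loop over an index list is the conjunction of the adjacent-equality agreements.
theorem hasPatternLoop_eq_all (w p : List Char) (is : List Nat) :
    hasPatternLoop w p is
      = is.all (fun i => (w.getD i ' ' == w.getD (i+1) ' ') == (p.getD i ' ' == p.getD (i+1) ' ')) := by
  induction is with
  | nil => rfl
  | cons i rest ih =>
    simp only [hasPatternLoop, List.all_cons, ih, List.getD]
    by_cases h1 : (w[i]?).getD ' ' = (w[i+1]?).getD ' ' <;>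
      by_cases h2 : (p[i]?).getD ' ' = (p[i+1]?).getD ' ' <;> simp [h1, h2]

theorem pvSig_cons (a b : Char) (t : List Char) :
    pvSig (a :: b :: t) = (a == b) :: pvSig (b :: t) := by
  simp [pvSig]

-- For equal-length lists, the index-loop agreement equals whole-signature equality.
theorem key (w : List Char) : ∀ (p : List Char), w.length = p.length →
    ((List.range (w.length - 1)).all
        (fun i => (w.getD i ' ' == w.getD (i+1) ' ') == (p.getD i ' ' == p.getD (i+1) ' ')))
      = (pvSig w == pvSig p) := by
  induction w with
  | nil =>
    intro p h
    cases p with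
    | nil => simp [pvSig]
    | cons c p' => simp at h
  | cons a w' ih =>
    intro p h
    cases p with
    | nil => simp at h
    | cons c p' =>
      cases w' with
      | nil =>
        cases p' with
        | nil => simp [pvSig]
        | cons d u => simp at h
      | cons b t =>
        cases p' with
        | nil => simp at h
        | cons d u =>
          have hlen : (b :: t).length = (d :: u).length := by
            simpa using h
          have := ih (d :: u) hlen
          have hrange : List.range ((a :: b :: t).length - 1)
              = 0 :: (List.range ((b :: t).length - 1)).map (· + 1) := by
            simp [List.range_succ_eq_map]
          rw [hrange, pvSig_cons, pvSig_cons]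
          simp only [List.all_cons, List.all_map, Function.comp_def,
            List.getD_cons_succ, List.getD_cons_zero, List.cons_beq_cons]
          simp only [List.getD_cons_succ] at this
          rw [this]

-- unfolding equations for pvRuns on a two-or-more list
theorem pvRuns_cons_ne (a b : Char) (t : List Char) (h : (b == a) = false) :
    pvRuns (a :: b :: t) = 1 :: pvRuns (b :: t) := by
  rw [pvRuns]
  simp [List.takeWhile, h]

theorem pvRuns_cons_eq (a : Char) (t : List Char) :
    pvRuns (a :: a :: t)
      = ((t.takeWhile (· == a)).length + 2) :: pvRuns (t.drop (t.takeWhile (· == a)).length) := by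
  rw [pvRuns]
  simp [List.takeWhile]

theorem pvRuns_eq_succ_cons (a : Char) (t : List Char) :
    ∃ k rest, pvRuns (a :: t) = (k + 1) :: rest := by
  rw [pvRuns]; exact ⟨_, _, rfl⟩

-- equal-char step: head of the run encoding is incremented, tail unchanged
theorem pvRuns_step_eq (a : Char) (t : List Char) :
    ∀ k rest, pvRuns (a :: t) = (k + 1) :: rest → pvRuns (a :: a :: t) = (k + 2) :: rest := by
  intro k rest h
  rw [pvRuns] at h
  simp only [List.cons.injEq] at h
  obtain ⟨h1, h2⟩ := h
  have hk : (t.takeWhile (· == a)).length = k := by omega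
  rw [pvRuns_cons_eq, h2, hk]

theorem beq_iff_shift (x y a b : Nat) (h : x = y ↔ a = b) : (x == y) = (a == b) := by
  by_cases hx : x = y
  · simp [hx, h.mp hx]
  · have h1 : (x == y) = false := by simp only [beq_eq_false_iff_ne]; exact hx
    have h2 : (a == b) = false := by
      simp only [beq_eq_false_iff_ne]; exact fun ha => hx (h.mpr ha)
    rw [h1, h2]

-- run-length lists agree iff the lengths agree and the adjacent-equality signatures agree
theorem pvRuns_sig (w : List Char) : ∀ (p : List Char),
    (pvRuns w == pvRuns p) = ((w.length == p.length) && (pvSig w == pvSig p)) := by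
  induction w with
  | nil =>
    intro p
    cases p with
    | nil => simp [pvRuns, pvSig]
    | cons c p' =>
      obtain ⟨k, rest, hk⟩ := pvRuns_eq_succ_cons c p'
      simp [pvRuns, hk]
  | cons a w' ih =>
    intro p
    cases p with
    | nil =>
      obtain ⟨k, rest, hk⟩ := pvRuns_eq_succ_cons a w'
      simp [pvRuns, hk]
    | cons c p' =>
      cases w' with
      | nil =>
        cases p' with
        | nil => simp [pvRuns, pvSig]
        | cons d u =>
          obtain ⟨k, rest, hk⟩ := pvRuns_eq_succ_cons d u
          by_cases hd : (d == c) = true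
          · have hd' : d = c := by simpa using hd
            subst hd'
            rw [pvRuns_step_eq d u k rest hk]
            simp [pvRuns]
          · rw [pvRuns_cons_ne c d u (by simpa using hd), hk]
            simp [pvRuns]
      | cons b t =>
        cases p' with
        | nil =>
          obtain ⟨k, rest, hk⟩ := pvRuns_eq_succ_cons b t
          by_cases hb : (b == a) = true
          · have hb' : b = a := by simpa using hb
            subst hb'
            rw [pvRuns_step_eq b t k rest hk]
            simp [pvRuns]
          · rw [pvRuns_cons_ne a b t (by simpa using hb), hk]
            simp [pvRuns]
        | cons d u =>
          have ihbd := ih (d :: u)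
          obtain ⟨kw, restw, hkw⟩ := pvRuns_eq_succ_cons b t
          obtain ⟨kp, restp, hkp⟩ := pvRuns_eq_succ_cons d u
          rw [pvSig_cons, pvSig_cons]
          rw [hkw, hkp] at ihbd
          by_cases hab : (b == a) = true
          · have hab' : b = a := by simpa using hab
            subst hab'
            rw [pvRuns_step_eq b t kw restw hkw]
            by_cases hcd : (d == c) = true
            · have hcd' : d = c := by simpa using hcd
              subst hcd'
              rw [pvRuns_step_eq d u kp restp hkp]
              simp only [List.cons_beq_cons, List.length_cons] at ihbd ⊢
              rw [show ((b == b) == (d == d)) = true by simp, Bool.true_and]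
              rw [show (kw + 2 == kp + 2) = (kw + 1 == kp + 1) from beq_iff_shift _ _ _ _ (by omega)]
              rw [ihbd]
              rw [show (t.length + 1 + 1 == u.length + 1 + 1) = (t.length + 1 == u.length + 1) from beq_iff_shift _ _ _ _ (by omega)]
            · have hdc : (d == c) = false := by simpa using hcd
              rw [pvRuns_cons_ne c d u hdc, hkp]
              have h1 : ((kw + 2 : Nat) == 1) = false := by
                simp only [beq_eq_false_iff_ne]; omega
              have h2 : ((b == b) == (c == d)) = false := by
                have hcd2 : (c == d) = false := by
                  simp only [beq_eq_false_iff_ne] at hdc ⊢; exact fun h => hdc h.symm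
                simp [hcd2]
              simp only [List.cons_beq_cons, List.length_cons, h1, h2,
                Bool.false_and, Bool.and_false]
          · have hba : (b == a) = false := by simpa using hab
            rw [pvRuns_cons_ne a b t hba, hkw]
            by_cases hcd : (d == c) = true
            · have hcd' : d = c := by simpa using hcd
              subst hcd'
              rw [pvRuns_step_eq d u kp restp hkp]
              have h1 : ((1 : Nat) == kp + 2) = false := by
                simp only [beq_eq_false_iff_ne]; omega
              have h2 : ((a == b) == (d == d)) = false := by
                have hab2 : (a == b) = false := by
                  simp only [beq_eq_false_iff_ne] at hba ⊢; exact fun h => hba h.symm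
                simp [hab2]
              simp only [List.cons_beq_cons, List.length_cons, h1, h2,
                Bool.false_and, Bool.and_false]
            · have hdc : (d == c) = false := by simpa using hcd
              rw [pvRuns_cons_ne c d u hdc, hkp]
              simp only [List.cons_beq_cons, List.length_cons] at ihbd ⊢
              rw [show ((1:Nat) == 1) = true by simp, Bool.true_and]
              rw [ihbd]
              have hab2 : (a == b) = false := by
                simp only [beq_eq_false_iff_ne] at hba ⊢; exact fun h => hba h.symm
              have hcd2 : (c == d) = false := by
                simp only [beq_eq_false_iff_ne] at hdc ⊢; exact fun h => hdc h.symm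
              rw [show ((a == b) == (c == d)) = true by rw [hab2, hcd2]; rfl, Bool.true_and]
              rw [show (t.length + 1 + 1 == u.length + 1 + 1) = (t.length + 1 == u.length + 1) from beq_iff_shift _ _ _ _ (by omega)]

-- A's per-word predicate equals B's run-length comparison.
theorem pred_eq (pattern : String) (word : String) :
    (if word.toList.length ≠ pattern.toList.length then false
       else hasPatternLoop word.toList pattern.toList (List.range (word.toList.length - 1)))
      = (pvRuns word.toList == pvRuns pattern.toList) := by
  rw [pvRuns_sig word.toList pattern.toList]
  by_cases h : word.toList.length = pattern.toList.length
  · rw [if_neg (not_not_intro h)]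
    rw [hasPatternLoop_eq_all, key _ _ h]
    rw [beq_iff_eq.mpr h, Bool.true_and]
  · rw [if_pos h]
    rw [beq_eq_false_iff_ne.mpr h, Bool.false_and]

-- ===== VERDICT (by name: the statement is the Claim_ definition above) =====
theorem find_similar_patterns_spec : Claim_equal_find_similar_patterns := by
  intro words pattern _
  unfold Spec_find_similar_patterns find_similar_patterns find_similar_patterns_alt
  apply List.filter_congr
  intro word _
  exact pred_eq pattern word
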